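-- pv_equiv track=rewrite | github.com/WayfinderFoundation/wayfinder-paths-sdk | wayfinder_paths/adapters/compound_adapter/adapter.py | _scale_to_decimals
-- ===== SOURCE A (Python) =====
-- def _scale_to_decimals(scale: int) -> int | None:
--     if scale <= 0:
--         return None
--     value = int(scale)
--     decimals = 0
--     while value > 1 and value % 10 == 0:
--         value //= 10
--         decimals += 1
--     if value == 1:
--         return decimals
--     return None
-- ===== SOURCE B (Python) =====
-- def _scale_to_decimals(scale: int) -> int | None:
--     if scale <= 0:
--         return None
--     s = str(int(scale))
--     if s == "1" + "0" * (len(s) - 1):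
--         return len(s) - 1
--     return None
-- ===== Notes on version B (the rewrite author's own statement) =====
-- stated objective: idiomatic
-- what changed: B inspects the decimal digit string (leading '1' followed only by '0's) instead of A's repeated floor-division-by-10 loop.
import Mathlib
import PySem

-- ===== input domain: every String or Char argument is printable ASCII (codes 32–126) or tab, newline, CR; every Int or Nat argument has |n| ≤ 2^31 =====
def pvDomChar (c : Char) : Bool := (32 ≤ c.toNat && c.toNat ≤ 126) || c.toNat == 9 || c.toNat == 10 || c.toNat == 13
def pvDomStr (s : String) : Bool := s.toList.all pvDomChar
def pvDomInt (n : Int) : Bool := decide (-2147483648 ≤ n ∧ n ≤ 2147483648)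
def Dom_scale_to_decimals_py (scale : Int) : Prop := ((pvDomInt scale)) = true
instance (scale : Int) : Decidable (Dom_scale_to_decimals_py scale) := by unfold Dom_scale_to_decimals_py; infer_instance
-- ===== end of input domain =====

-- B replaces A's repeated floor-division-by-10 loop with an inspection of the decimal
-- digit string ('1' followed only by '0's); same return value everywhere.

-- ===== PORT A =====
-- Python '//' and '%' with the positive divisor 10 (used by the port and its termination proof)
theorem pvFdiv10 (a : Int) : a.fdiv 10 = a / 10 := by
  rw [Int.fdiv_eq_ediv]; norm_num

-- the while loop of A: state (value, decimals)
def pvLoopA (value : Int) (decimals : Int) : Int × Int :=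
  if h : value > 1 ∧ PySem.Int.mod value 10 = 0 then
    pvLoopA (PySem.Int.floordiv value 10) (decimals + 1)
  else (value, decimals)
termination_by value.toNat
decreasing_by
  simp only [PySem.Int.floordiv, pvFdiv10]
  omega

def scale_to_decimals_py (scale : Int) : Option Int :=
  if scale ≤ 0 then none
  else
    let value : Int := scale          -- int(scale)
    let r := pvLoopA value 0
    if r.1 = 1 then some r.2 else none

-- ===== PORT B =====
def scale_to_decimals_py_alt (scale : Int) : Option Int :=
  if scale ≤ 0 then none
  else
    let s := PySem.Int.toChars scale  -- str(int(scale))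
    if s = '1' :: List.replicate (s.length - 1) '0' then some ((s.length : Int) - 1)
    else none

-- ===== PRECONDITION & SPEC =====
def Spec_scale_to_decimals_py (scale : Int) (out : Option Int) : Prop := out = scale_to_decimals_py_alt scale
instance (scale : Int) (out : Option Int) : Decidable (Spec_scale_to_decimals_py scale out) := by unfold Spec_scale_to_decimals_py; infer_instance

-- ===== CLAIM (what is proved, stated in full; the proofs are below) =====
def Claim_equal_scale_to_decimals_py : Prop := ∀ (scale : Int), Dom_scale_to_decimals_py scale → Spec_scale_to_decimals_py scale (scale_to_decimals_py scale)

-- ===== LEMMAS AND PROOFS =====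

theorem pvFmod10 (a : Int) : a.fmod 10 = a % 10 := by
  rw [Int.fmod_eq_emod]; norm_num

-- A clean recursive description of `Nat.toDigits 10`
def pvMyDigits (n : Nat) : List Char :=
  if _h : n < 10 then [Nat.digitChar n]
  else pvMyDigits (n / 10) ++ [Nat.digitChar (n % 10)]
termination_by n
decreasing_by omega

theorem pvDigitChar_eq_zero : ∀ m, m < 10 → Nat.digitChar m = '0' → m = 0 := by decide

theorem pvDigitChar_eq_one : ∀ m, m < 10 → Nat.digitChar m = '1' → m = 1 := by decide

theorem pvToDigitsCore_eq (f : Nat) : ∀ n l, n < f →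
    Nat.toDigitsCore 10 f n l = pvMyDigits n ++ l := by
  induction f with
  | zero => intro n l h; omega
  | succ f ih =>
    intro n l h
    rw [Nat.toDigitsCore]
    by_cases h10 : n < 10
    · have : n / 10 = 0 := Nat.div_eq_of_lt h10
      rw [pvMyDigits]
      simp [this, h10, Nat.mod_eq_of_lt h10]
    · have hne : ¬ n / 10 = 0 := by omega
      have hlt : n / 10 < f := by omega
      rw [if_neg hne, ih _ _ hlt]
      conv_rhs => rw [pvMyDigits]
      rw [dif_neg h10, List.append_assoc]
      rfl

theorem pvToDigits_eq (n : Nat) : Nat.toDigits 10 n = pvMyDigits n := by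
  rw [Nat.toDigits, pvToDigitsCore_eq (n + 1) n [] (by omega), List.append_nil]

theorem pvMyDigits_pow (k : Nat) : pvMyDigits (10 ^ k) = '1' :: List.replicate k '0' := by
  induction k with
  | zero => rw [pvMyDigits]; decide
  | succ k ih =>
    have hge : ¬ 10 ^ (k + 1) < 10 := by
      have : 10 ^ 1 ≤ 10 ^ (k + 1) := Nat.pow_le_pow_right (by norm_num) (by omega)
      simpa using this
    rw [pvMyDigits, dif_neg hge]
    have h1 : 10 ^ (k + 1) / 10 = 10 ^ k := by
      rw [pow_succ, Nat.mul_div_cancel _ (by norm_num)]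
    have h2 : 10 ^ (k + 1) % 10 = 0 := by
      rw [pow_succ]; exact Nat.mul_mod_left _ _
    have h0 : Nat.digitChar 0 = '0' := by decide
    rw [h1, h2, ih, h0]
    simp [List.replicate_succ']

theorem pvMyDigits_ne_nil (n : Nat) : pvMyDigits n ≠ [] := by
  rw [pvMyDigits]
  split
  · simp
  · simp

theorem pvMyDigits_pow_inv : ∀ n k, pvMyDigits n = '1' :: List.replicate k '0' → n = 10 ^ k := by
  intro n
  induction n using Nat.strong_induction_on with
  | _ n ih =>
    intro k h
    rw [pvMyDigits] at h
    by_cases h10 : n < 10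
    · rw [dif_pos h10] at h
      have hk : k = 0 := by
        have := congrArg List.length h
        simp at this
        omega
      subst hk
      simp at h
      have := pvDigitChar_eq_one n h10 h
      simp [this]
    · rw [dif_neg h10] at h
      -- k ≥ 1: the left side has length ≥ 2
      have hlen := congrArg List.length h
      simp at hlen
      have hdne := pvMyDigits_ne_nil (n / 10)
      have hk1 : 1 ≤ k := by
        rcases List.exists_cons_of_ne_nil hdne with ⟨a, t, he⟩
        rw [he] at hlen; simp at hlen; omega
      -- split the replicate as ('1' :: replicate (k-1) '0') ++ ['0']
      have hsplit : ('1' : Char) :: List.replicate k '0'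
          = ('1' :: List.replicate (k - 1) '0') ++ ['0'] := by
        have : k = (k - 1) + 1 := by omega
        rw [this]
        simp [List.replicate_succ']
      rw [hsplit] at h
      obtain ⟨hpre, hlast⟩ := List.append_inj' h (by simp)
      have hmod : n % 10 = 0 := by
        apply pvDigitChar_eq_zero _ (Nat.mod_lt _ (by norm_num))
        simpa using congrArg List.headI hlast
      have hrec := ih (n / 10) (by omega) (k - 1) hpre
      have hn : n = 10 * (n / 10) := by omega
      rw [hn, hrec, ← pow_succ']
      congr 1
      omega

theorem pvLoopA_pow (k : Nat) : ∀ d : Int, pvLoopA ((10 : Int) ^ k) d = (1, d + k) := by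
  induction k with
  | zero => intro d; rw [pvLoopA]; norm_num
  | succ k ih =>
    intro d
    rw [pvLoopA]
    have hgt : ((10 : Int) ^ (k + 1)) > 1 := by
      have : (10 : Int) ^ 1 ≤ 10 ^ (k + 1) := pow_le_pow_right₀ (by norm_num) (by omega)
      simpa using lt_of_lt_of_le (by norm_num) this
    have hmod : PySem.Int.mod ((10 : Int) ^ (k + 1)) 10 = 0 := by
      simp only [PySem.Int.mod, pvFmod10]
      rw [pow_succ]
      simp [Int.mul_emod_left]
    have hdiv : PySem.Int.floordiv ((10 : Int) ^ (k + 1)) 10 = 10 ^ k := by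
      simp only [PySem.Int.floordiv, pvFdiv10]
      rw [pow_succ, Int.mul_ediv_cancel _ (by norm_num)]
    rw [dif_pos ⟨hgt, hmod⟩, hdiv, ih]
    push_cast
    ring_nf

theorem pvLoopA_not_pow : ∀ (n : Nat), 1 ≤ n → (∀ k : Nat, (n : Int) ≠ 10 ^ k) →
    ∀ d : Int, (pvLoopA (n : Int) d).1 ≠ 1 := by
  intro n
  induction n using Nat.strong_induction_on with
  | _ n ih =>
    intro hn hnp d
    rw [pvLoopA]
    by_cases hg : ((n : Int) > 1 ∧ PySem.Int.mod (n : Int) 10 = 0)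
    · rw [dif_pos hg]
      obtain ⟨hg1, hg2⟩ := hg
      have hmod : n % 10 = 0 := by
        simp only [PySem.Int.mod, pvFmod10] at hg2
        omega
      have hdiv : PySem.Int.floordiv (n : Int) 10 = ((n / 10 : Nat) : Int) := by
        simp only [PySem.Int.floordiv, pvFdiv10]
        omega
      rw [hdiv]
      apply ih (n / 10) (by omega) (by omega)
      intro k hk
      apply hnp (k + 1)
      rw [pow_succ', ← hk]
      omega
    · rw [dif_neg hg]
      simp only
      intro h1
      apply hnp 0
      simp [h1]

theorem pvToChars_pos (scale : Int) (h : 0 < scale) :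
    PySem.Int.toChars scale = pvMyDigits scale.toNat := by
  simp only [PySem.Int.toChars]
  rw [if_neg (by omega), pvToDigits_eq]

theorem scale_to_decimals_py_eq (scale : Int) :
    scale_to_decimals_py scale = scale_to_decimals_py_alt scale := by
  by_cases hpos : scale ≤ 0
  · simp [scale_to_decimals_py, scale_to_decimals_py_alt, hpos]
  · push_neg at hpos
    have hs : scale = ((scale.toNat : Int)) := by omega
    simp only [scale_to_decimals_py, scale_to_decimals_py_alt, if_neg (by omega : ¬ scale ≤ 0)]
    rw [pvToChars_pos scale hpos]
    by_cases hp : ∃ k : Nat, (scale.toNat : Int) = 10 ^ k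
    · obtain ⟨k, hk⟩ := hp
      have hkn : scale.toNat = 10 ^ k := by exact_mod_cast hk
      have hA : pvLoopA scale 0 = (1, (k : Int)) := by
        rw [hs, hk, pvLoopA_pow k 0, zero_add]
      rw [hA, hkn, pvMyDigits_pow]
      simp
    · push_neg at hp
      have hA : (pvLoopA scale 0).1 ≠ 1 := by
        rw [hs]
        exact pvLoopA_not_pow scale.toNat (by omega) hp 0
      rw [if_neg hA]
      have hB : ¬ pvMyDigits scale.toNat
          = '1' :: List.replicate ((pvMyDigits scale.toNat).length - 1) '0' := by
        intro hc
        exact hp _ (by exact_mod_cast pvMyDigits_pow_inv scale.toNat _ hc)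
      rw [if_neg hB]

-- ===== VERDICT (by name: the statement is the Claim_ definition above) =====
theorem scale_to_decimals_py_spec : Claim_equal_scale_to_decimals_py := by
  intro scale _
  unfold Spec_scale_to_decimals_py
  exact scale_to_decimals_py_eq scale
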